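-- pv_equiv track=rewrite | github.com/trifwn/FusedFilamentANN | architectures.py | getSchemas
-- ===== SOURCE A (Python) =====
-- def getSchemas(actfun):
--     schema3 = []
--     for l1 in range(4):
--         for l2 in range(4):
--             for l3 in range(4):
--                 schema3.append([actfun[l1],actfun[l2],actfun[l3]])
--     schema2 = []
--     for l1 in range(4):
--         for l2 in range(4):
--             schema2.append([actfun[l1],actfun[l2]])
--     schema1 = []
--     for l1 in range(4):
--             schema1.append([actfun[l1]])
--     return [schema1,schema2,schema3]
-- ===== SOURCE B (Python) =====
-- def getSchemas(actfun):
--     base = [actfun[i] for i in range(4)]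
--     def level(n):
--         out = []
--         for code in range(4 ** n):
--             digits = []
--             for _ in range(n):
--                 digits.append(base[code % 4])
--                 code //= 4
--             digits.reverse()
--             out.append(digits)
--         return out
--     return [level(1), level(2), level(3)]
-- ===== Notes on version B (the rewrite author's own statement) =====
-- stated objective: alternative
-- what changed: Replaces the three independent nested loop nests with a mixed-radix enumeration: each level-n schema entry is decoded from a single counter 0..4^n-1 by peeling its base-4 digits, indexing a base list built once.
import Mathlib
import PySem

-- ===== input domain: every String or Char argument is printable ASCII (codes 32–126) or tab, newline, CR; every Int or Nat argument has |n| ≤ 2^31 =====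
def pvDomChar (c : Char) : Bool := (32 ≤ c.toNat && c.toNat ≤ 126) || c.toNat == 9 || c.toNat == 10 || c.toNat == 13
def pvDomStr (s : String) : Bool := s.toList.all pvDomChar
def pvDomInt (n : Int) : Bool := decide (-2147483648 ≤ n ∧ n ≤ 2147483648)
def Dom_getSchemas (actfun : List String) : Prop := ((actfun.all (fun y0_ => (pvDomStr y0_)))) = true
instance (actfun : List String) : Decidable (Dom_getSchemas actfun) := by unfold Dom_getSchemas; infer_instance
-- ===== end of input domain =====

-- B decodes each tuple from a single mixed-radix counter (base-4 digits of an index) instead of three independent loop nests; objective: alternative.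


-- ===== PORT A =====
-- actfun[i] for i in range(4): inside Pre_ all indices are in range, so pyGetD's default is never used
def getSchemas (actfun : List String) : List (List (List String)) :=
  let schema3 := (PySem.List.pyRange 0 4 1).foldl (fun acc l1 =>
    (PySem.List.pyRange 0 4 1).foldl (fun acc l2 =>
      (PySem.List.pyRange 0 4 1).foldl (fun acc l3 =>
        acc ++ [[PySem.List.pyGetD actfun l1 "", PySem.List.pyGetD actfun l2 "", PySem.List.pyGetD actfun l3 ""]]) acc) acc) []
  let schema2 := (PySem.List.pyRange 0 4 1).foldl (fun acc l1 =>
    (PySem.List.pyRange 0 4 1).foldl (fun acc l2 =>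
      acc ++ [[PySem.List.pyGetD actfun l1 "", PySem.List.pyGetD actfun l2 ""]]) acc) []
  let schema1 := (PySem.List.pyRange 0 4 1).foldl (fun acc l1 =>
    acc ++ [[PySem.List.pyGetD actfun l1 ""]]) []
  [schema1, schema2, schema3]

-- ===== PORT B =====
-- inner 'for _ in range(n)' loop of Source B: peel base-4 digits of code, appending base[code % 4]
def pvDecodeLoop (n : Nat) (code : Int) (base : List String) (digits : List String) : List String :=
  match n with
  | 0 => digits
  | n+1 => pvDecodeLoop n (PySem.Int.floordiv code 4) base
      (digits ++ [PySem.List.pyGetD base (PySem.Int.mod code 4) ""])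

def pvLevel (base : List String) (n : Nat) : List (List String) :=
  (PySem.List.pyRange 0 ((4:Int)^n) 1).foldl
    (fun out code => out ++ [(pvDecodeLoop n code base []).reverse]) []

def getSchemas_alt (actfun : List String) : List (List (List String)) :=
  let base := (PySem.List.pyRange 0 4 1).map (fun i => PySem.List.pyGetD actfun i "")
  [pvLevel base 1, pvLevel base 2, pvLevel base 3]

-- ===== PRECONDITION & SPEC =====
-- Pre_ excludes lists shorter than 4, on which A raises IndexError (B raises there too).
def Pre_getSchemas (actfun : List String) : Prop := 4 ≤ actfun.length
instance (actfun : List String) : Decidable (Pre_getSchemas actfun) := by unfold Pre_getSchemas; infer_instance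
def pvWitness_getSchemas : List String := ["relu", "tanh", "sigmoid", "elu"]
def Spec_getSchemas (actfun : List String) (out : List (List (List String))) : Prop := out = getSchemas_alt actfun
instance (actfun : List String) (out : List (List (List String))) : Decidable (Spec_getSchemas actfun out) := by unfold Spec_getSchemas; infer_instance

-- ===== CLAIM (what is proved, stated in full; the proofs are below) =====
def Claim_equal_getSchemas : Prop := ∀ (actfun : List String), Dom_getSchemas actfun → Pre_getSchemas actfun → Spec_getSchemas actfun (getSchemas actfun)

-- ===== LEMMAS AND PROOFS =====

-- ===== VERDICT =====
set_option maxHeartbeats 4000000 in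
set_option maxRecDepth 10000 in
theorem getSchemas_spec : Claim_equal_getSchemas := by
  intro actfun _ hpre
  unfold Pre_getSchemas at hpre
  match actfun, hpre with
  | a :: b :: c :: d :: rest, _ =>
    show Spec_getSchemas _ _
    unfold Spec_getSchemas getSchemas getSchemas_alt pvLevel
    rfl
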